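-- pv_equiv track=rewrite | github.com/6210qwe/leetcode_py | leetcode_solutions/by_id/q1000314.py | solution_function_name
-- ===== SOURCE A (Python) =====
-- from typing import List, Optional
--
-- def solution_function_name(nums: List[int], sequences: List[List[int]]) -> bool:
--     """
--     函数式接口 - 检查 nums 是否是唯一的最短超序列
--     """
--     # 构建图和入度表
--     graph = {i: [] for i in range(1, len(nums) + 1)}
--     in_degree = {i: 0 for i in range(1, len(nums) + 1)}
--
--     for seq in sequences:
--         for i in range(len(seq) - 1):
--             u, v = seq[i], seq[i + 1]
--             graph[u].append(v)
--             in_degree[v] += 1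
--
--     # 初始化队列，将入度为 0 的节点加入队列
--     queue = [node for node in in_degree if in_degree[node] == 0]
--
--     # 进行拓扑排序
--     index = 0
--     while queue:
--         if len(queue) > 1:
--             return False
--         node = queue.pop(0)
--         if node != nums[index]:
--             return False
--         index += 1
--         for neighbor in graph[node]:
--             in_degree[neighbor] -= 1
--             if in_degree[neighbor] == 0:
--                 queue.append(neighbor)
--
--     return index == len(nums)
-- ===== SOURCE B (Python) =====
-- def solution_function_name(nums, sequences):
--     n = len(nums)
--     # build the same adjacency / in-degree tables from the sequences
--     graph = {i: [] for i in range(1, n + 1)}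
--     in_degree = {i: 0 for i in range(1, n + 1)}
--     for seq in sequences:
--         for i in range(len(seq) - 1):
--             u, v = seq[i], seq[i + 1]
--             graph[u].append(v)
--             in_degree[v] += 1
--     # nums must be exactly the permutation 1..n
--     if sorted(nums) != list(range(1, n + 1)):
--         return False
--     pos = {v: i for i, v in enumerate(nums)}
--     # every edge must point forward in nums (valid topological order, no cycle)
--     if not all(pos[u] < pos[v] for u in graph for v in graph[u]):
--         return False
--     # uniqueness: each consecutive pair of nums must be forced by an edge
--     return all(v in graph[u] for u, v in zip(nums, nums[1:]))
-- ===== Notes on version B (the rewrite author's own statement) =====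
-- stated objective: simpler
-- what changed: B keeps the adjacency/in-degree construction pass but replaces A's Kahn queue simulation (repeatedly pop the unique zero-in-degree node and compare with nums) by the direct characterization: nums must be exactly the permutation 1..n, every recorded edge must point forward in nums, and every consecutive pair of nums must be a recorded edge; Pre_ excludes exactly the inputs on which both programs raise KeyError (a sequence of length >= 2 containing a value outside 1..len(nums)).
import Mathlib
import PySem

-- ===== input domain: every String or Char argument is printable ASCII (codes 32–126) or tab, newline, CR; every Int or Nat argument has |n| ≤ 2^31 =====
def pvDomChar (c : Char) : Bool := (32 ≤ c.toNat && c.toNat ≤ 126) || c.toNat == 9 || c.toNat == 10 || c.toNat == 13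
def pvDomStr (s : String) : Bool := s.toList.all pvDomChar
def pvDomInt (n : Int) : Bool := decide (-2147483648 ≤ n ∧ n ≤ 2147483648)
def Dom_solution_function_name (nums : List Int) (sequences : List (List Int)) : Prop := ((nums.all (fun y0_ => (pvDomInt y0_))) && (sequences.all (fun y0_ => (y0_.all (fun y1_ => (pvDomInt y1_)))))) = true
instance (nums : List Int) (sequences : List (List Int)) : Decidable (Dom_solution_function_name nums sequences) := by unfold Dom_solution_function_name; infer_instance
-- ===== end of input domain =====

-- B keeps A's table-building pass but replaces the Kahn queue simulation by the
-- direct characterization (nums is the permutation 1..n, every edge points forward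
-- in nums, every consecutive pair of nums is an edge); objective: simpler.

-- ===== PORT A =====
-- one step of A's inner 'for neighbor in graph[node]' loop (decrement, push on zero)
def pvDecStep (p : PySem.Dict Int Int × List Int) (nb : Int) : PySem.Dict Int Int × List Int :=
  let d := p.1.modify nb 0 (· - 1)
  if d.getD nb 0 = 0 then (d, p.2 ++ [nb]) else (d, p.2)

-- A's 'while queue' loop; fuel only makes the recursion total (n+1 always suffices)
def pvKahn (nums : List Int) (graph : PySem.Dict Int (List Int)) :
    Nat → PySem.Dict Int Int → List Int → Nat → Bool
  | fuel, inDeg, queue, index =>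
    match queue with
    | [] => decide (index = nums.length)
    | node :: rest =>
      match fuel with
      | 0 => false
      | fuel' + 1 =>
        if 1 < (node :: rest).length then false
        else if node ≠ PySem.List.pyGetD nums (index : Int) 0 then false
        else
          let p := (graph.getD node []).foldl pvDecStep (inDeg, rest)
          pvKahn nums graph fuel' p.1 p.2 (index + 1)

-- the graph/in_degree construction loops of A (same single pass over sequences)
def pvBuild (n : Nat) (sequences : List (List Int)) :
    PySem.Dict Int (List Int) × PySem.Dict Int Int :=
  sequences.foldl (fun p seq =>
      (PySem.List.pyRange 0 ((seq.length : Int) - 1) 1).foldl (fun p i =>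
        let u := PySem.List.pyGetD seq i 0
        let v := PySem.List.pyGetD seq (i + 1) 0
        (p.1.modify u [] (· ++ [v]), p.2.modify v 0 (· + 1))) p)
    ((PySem.List.pyRange 1 ((n : Int) + 1) 1).foldl (fun d i => d.insert i ([] : List Int)) PySem.Dict.empty,
     (PySem.List.pyRange 1 ((n : Int) + 1) 1).foldl (fun d i => d.insert i (0 : Int)) PySem.Dict.empty)

def solution_function_name (nums : List Int) (sequences : List (List Int)) : Bool :=
  let n := nums.length
  let gp := pvBuild n sequences
  let queue := gp.2.keys.filter (fun node => gp.2.getD node 0 == 0)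
  pvKahn nums gp.1 (n + 1) gp.2 queue 0

-- ===== PORT B =====
-- B keeps A's table-building loops verbatim (same pvBuild pass over sequences),
-- then judges directly instead of simulating Kahn's queue.
def solution_function_name_alt (nums : List Int) (sequences : List (List Int)) : Bool :=
  let n := nums.length
  let gp := pvBuild n sequences
  if PySem.List.sorted nums (fun x => x) false ≠ PySem.List.pyRange 1 ((n : Int) + 1) 1 then false
  else
    let pos : PySem.Dict Int Int :=
      (PySem.List.enumerate nums 0).foldl (fun d p => d.insert p.2 p.1) PySem.Dict.empty
    if ¬ (gp.1.keys.all fun u => (gp.1.getD u []).all fun v =>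
        decide (pos.getD u 0 < pos.getD v 0)) then false
    else
      (nums.zip (nums.drop 1)).all fun p => decide (p.2 ∈ gp.1.getD p.1 [])

-- ===== PRECONDITION & SPEC =====
-- Pre_ excludes exactly the inputs where A raises KeyError: a sequence of length ≥ 2
-- containing a value outside 1..len(nums) (graph[u] / in_degree[v] lookup fails).
def Pre_solution_function_name (nums : List Int) (sequences : List (List Int)) : Prop :=
  ∀ seq ∈ sequences, 2 ≤ seq.length → ∀ x ∈ seq, 1 ≤ x ∧ x ≤ (nums.length : Int)
instance (nums : List Int) (sequences : List (List Int)) : Decidable (Pre_solution_function_name nums sequences) := by unfold Pre_solution_function_name; infer_instance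

def pvWitness_solution_function_name : List Int × List (List Int) := ([1, 2], [[1, 2]])

def Spec_solution_function_name (nums : List Int) (sequences : List (List Int)) (out : Bool) : Prop := out = solution_function_name_alt nums sequences
instance (nums : List Int) (sequences : List (List Int)) (out : Bool) : Decidable (Spec_solution_function_name nums sequences out) := by unfold Spec_solution_function_name; infer_instance

-- ===== CLAIM (what is proved, stated in full; the proofs are below) =====
def Claim_equal_solution_function_name : Prop := ∀ (nums : List Int) (sequences : List (List Int)), Dom_solution_function_name nums sequences → Pre_solution_function_name nums sequences → Spec_solution_function_name nums sequences (solution_function_name nums sequences)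
-- ===== LEMMAS AND PROOFS =====

-- the consecutive pairs (seq[i], seq[i+1]) of one sequence
def pvPairsOf (seq : List Int) : List (Int × Int) :=
  (PySem.List.pyRange 0 ((seq.length : Int) - 1) 1).map
    (fun i => (PySem.List.pyGetD seq i 0, PySem.List.pyGetD seq (i + 1) 0))

-- the edge multiset (all consecutive pairs of all sequences)
def pvE (sequences : List (List Int)) : List (Int × Int) := sequences.flatMap pvPairsOf

def pvNodes (n : Nat) : List Int := PySem.List.pyRange 1 ((n : Int) + 1) 1

-- Cb j: every edge into nums[j] comes from an earlier position of nums
def pvCgood (nums : List Int) (E : List (Int × Int)) (j : Nat) : Bool :=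
  E.all fun e => !(e.2 == nums.getD j 0) || (decide (e.1 ∈ nums) && decide (nums.idxOf e.1 < j))

-- Pb j: the consecutive pair (nums[j-1], nums[j]) is an edge
def pvPgood (nums : List Int) (E : List (Int × Int)) (j : Nat) : Bool :=
  decide ((nums.getD (j - 1) 0, nums.getD j 0) ∈ E)

def pvGood (nums : List Int) (E : List (Int × Int)) (j : Nat) : Bool :=
  pvCgood nums E j && (decide (j = 0) || pvPgood nums E j)

theorem pvFoldInsertConst {ν : Type} (l : List Int) (c : ν) (d : PySem.Dict Int ν)
    (h : ∀ v, d.getD v c = c) :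
    ∀ v, (l.foldl (fun d i => d.insert i c) d).getD v c = c := by
  induction l generalizing d with
  | nil => exact h
  | cons x t ih =>
    refine ih _ (fun v => ?_)
    rw [PySem.Dict.getD_insert]
    split <;> simp [h]

theorem pvDecStep_eq (p : PySem.Dict Int Int × List Int) (nb : Int) :
    pvDecStep p nb = (p.1.modify nb 0 (· - 1),
      if (p.1.modify nb 0 (· - 1)).getD nb 0 = 0 then p.2 ++ [nb] else p.2) := by
  unfold pvDecStep; split <;> simp_all

theorem pvCountPSplit (p q r : (Int × Int) → Bool) (l : List (Int × Int))
    (h : ∀ a ∈ l, (p a = (q a || r a)) ∧ ¬(q a = true ∧ r a = true)) :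
    l.countP p = l.countP q + l.countP r := by
  induction l with
  | nil => simp
  | cons x t ih =>
    have hx := h x (by simp)
    have ht := ih (fun a ha => h a (by simp [ha]))
    rcases hq : q x <;> rcases hr : r x <;> simp_all <;> omega

-- inner decrement loop: final in-degrees and the pushed suffix of the queue
theorem pvInner (adj : List Int) (d : PySem.Dict Int Int) (q0 : List Int) :
    (∀ v, (adj.foldl pvDecStep (d, q0)).1.getD v 0 = d.getD v 0 - adj.count v) ∧
    ∃ pushed, (adj.foldl pvDecStep (d, q0)).2 = q0 ++ pushed ∧ pushed.Nodup ∧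
      (∀ v, v ∈ pushed ↔ (1 ≤ d.getD v 0 ∧ d.getD v 0 ≤ (adj.count v : Int))) := by
  induction adj generalizing d q0 with
  | nil =>
    refine ⟨fun v => by simp, [], by simp, by simp, fun v => by simp; omega⟩
  | cons nb t ih =>
    have hd1 : ∀ v, (d.modify nb 0 (· - 1)).getD v 0 =
        if v = nb then d.getD nb 0 - 1 else d.getD v 0 := by
      intro v; rw [PySem.Dict.getD_modify]
    rw [List.foldl_cons, pvDecStep_eq]
    set d1 := d.modify nb 0 (· - 1) with hd1def
    set q1 := if d1.getD nb 0 = 0 then q0 ++ [nb] else q0 with hq1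
    obtain ⟨h1, pushed', h2, h3, h4⟩ := ih d1 q1
    have hcnt : ∀ v : Int, (nb :: t).count v = t.count v + if v = nb then 1 else 0 := by
      intro v; rw [List.count_cons]
      by_cases h : v = nb
      · simp [h]
      · simp [h, Ne.symm h]
    constructor
    · intro v
      rw [h1 v, hd1 v, hcnt v]
      by_cases hv : v = nb
      · subst hv; rw [if_pos rfl, if_pos rfl]; push_cast; omega
      · rw [if_neg hv, if_neg hv]; simp
    · have hcond : (d1.getD nb 0 = 0) ↔ d.getD nb 0 = 1 := by rw [hd1 nb]; simp; omega
      refine ⟨(if d.getD nb 0 = 1 then [nb] else []) ++ pushed', ?_, ?_, ?_⟩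
      · rw [h2, hq1]
        by_cases hc : d.getD nb 0 = 1
        · rw [if_pos (hcond.2 hc), if_pos hc]; simp
        · rw [if_neg (fun hh => hc (hcond.1 hh)), if_neg hc]; simp
      · by_cases hc : d.getD nb 0 = 1
        · rw [if_pos hc]
          simp only [List.nodup_cons, List.singleton_append]
          refine ⟨fun hmem => absurd ((h4 nb).1 hmem).1 ?_, h3⟩
          rw [hd1 nb, if_pos rfl]
          omega
        · rw [if_neg hc]; simpa using h3
      · intro v
        have hmem : v ∈ (if d.getD nb 0 = 1 then [nb] else []) ++ pushed' ↔
            ((d.getD nb 0 = 1 ∧ v = nb) ∨ v ∈ pushed') := by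
          by_cases hc : d.getD nb 0 = 1 <;> simp [hc]
        rw [hmem, h4 v, hd1 v, hcnt v]
        by_cases hv : v = nb
        · subst hv; rw [if_pos rfl, if_pos rfl]; push_cast; omega
        · rw [if_neg hv, if_neg hv]; push_cast; omega

theorem pvKahn_nil (nums : List Int) (g : PySem.Dict Int (List Int)) (fuel : Nat)
    (d : PySem.Dict Int Int) (idx : Nat) :
    pvKahn nums g fuel d [] idx = decide (idx = nums.length) := by
  unfold pvKahn; rfl

theorem pvKahn_zero (nums : List Int) (g : PySem.Dict Int (List Int))
    (d : PySem.Dict Int Int) (node : Int) (rest : List Int) (idx : Nat) :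
    pvKahn nums g 0 d (node :: rest) idx = false := by
  unfold pvKahn; rfl

theorem pvKahn_succ (nums : List Int) (g : PySem.Dict Int (List Int)) (fuel : Nat)
    (d : PySem.Dict Int Int) (node : Int) (rest : List Int) (idx : Nat) :
    pvKahn nums g (fuel + 1) d (node :: rest) idx =
      if 1 < (node :: rest).length then false
      else if node ≠ PySem.List.pyGetD nums (idx : Int) 0 then false
      else pvKahn nums g fuel ((g.getD node []).foldl pvDecStep (d, rest)).1
        ((g.getD node []).foldl pvDecStep (d, rest)).2 (idx + 1) := by
  conv_lhs => unfold pvKahn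

-- A's result is true only if nums lists distinct nodes (used for the non-permutation case)
theorem pvTrace (nums : List Int) (graph : PySem.Dict Int (List Int))
    (htgt : ∀ u, ∀ x ∈ graph.getD u [], x ∈ pvNodes nums.length) :
    ∀ fuel (d : PySem.Dict Int Int) queue idx, queue.Nodup →
    (∀ v ∈ queue, v ∈ pvNodes nums.length ∧ d.getD v 0 ≤ 0) →
    pvKahn nums graph fuel d queue idx = true →
    idx ≤ nums.length ∧ (nums.drop idx).Nodup ∧
      (∀ x ∈ nums.drop idx, x ∈ pvNodes nums.length) ∧
      (∀ v, d.getD v 0 ≤ 0 → v ∉ queue → v ∉ nums.drop idx) := by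
  intro fuel
  induction fuel with
  | zero =>
    intro d queue idx hnd hq hres
    cases queue with
    | nil =>
      rw [pvKahn_nil] at hres
      have hidx : idx = nums.length := by simpa using hres
      subst hidx
      simp [List.drop_length]
    | cons node rest => rw [pvKahn_zero] at hres; exact absurd hres (by simp)
  | succ fuel ih =>
    intro d queue idx hnd hq hres
    cases queue with
    | nil =>
      rw [pvKahn_nil] at hres
      have hidx : idx = nums.length := by simpa using hres
      subst hidx
      simp [List.drop_length]
    | cons node rest =>
      rw [pvKahn_succ] at hres
      by_cases hlen : 1 < (node :: rest).length
      · rw [if_pos hlen] at hres; exact absurd hres (by simp)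
      · rw [if_neg hlen] at hres
        have hrest : rest = [] := by
          cases rest with
          | nil => rfl
          | cons a t => simp at hlen
        subst hrest
        by_cases hnode : node ≠ PySem.List.pyGetD nums (idx : Int) 0
        · rw [if_pos hnode] at hres; exact absurd hres (by simp)
        · rw [if_neg hnode] at hres
          push_neg at hnode
          obtain ⟨h1, pushed, h2, h3, h4⟩ :=
            pvInner (graph.getD node []) d []
          have hq2 : ((graph.getD node []).foldl pvDecStep (d, ([] : List Int))).2 = pushed := by
            rw [h2]; rfl
          rw [hq2] at hres
          have hnode0 := hq node (by simp)
          obtain ⟨hidx1, hnd2, hmem2, hnotin⟩ :=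
            ih ((graph.getD node []).foldl pvDecStep (d, [])).1 pushed (idx + 1) h3
              (by
                intro v hv
                obtain ⟨ha, hb⟩ := (h4 v).1 hv
                have hcnt : 0 < (graph.getD node []).count v := by omega
                refine ⟨htgt node v (List.count_pos_iff.1 hcnt), ?_⟩
                rw [h1 v]; omega)
              hres
          have hidxlt : idx < nums.length := by omega
          have hnodeget : node = nums[idx] := by
            rw [hnode, PySem.List.pyGetD_natCast, List.getD_eq_getElem _ _ hidxlt]
          have hdrop : nums.drop idx = node :: nums.drop (idx + 1) := by
            rw [hnodeget]; exact (List.getElem_cons_drop hidxlt).symm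
          have hnotpushed : ∀ v, d.getD v 0 ≤ 0 → v ∉ pushed := by
            intro v hv hmem
            have := ((h4 v).1 hmem).1
            omega
          have hdec : ∀ v, d.getD v 0 ≤ 0 →
              ((graph.getD node []).foldl pvDecStep (d, [])).1.getD v 0 ≤ 0 := by
            intro v hv
            rw [h1 v]
            have : (0:Int) ≤ ((graph.getD node []).count v : Int) := by positivity
            omega
          refine ⟨by omega, ?_, ?_, ?_⟩
          · rw [hdrop, List.nodup_cons]
            exact ⟨hnotin node (hdec node hnode0.2) (hnotpushed node hnode0.2), hnd2⟩
          · rw [hdrop]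
            intro x hx
            rcases List.mem_cons.1 hx with hx | hx
            · rw [hx]; exact hnode0.1
            · exact hmem2 x hx
          · intro v hv hvq
            rw [hdrop, List.mem_cons]
            push_neg
            exact ⟨fun hveq => hvq (by simp [hveq]),
              hnotin v (hdec v hv) (hnotpushed v hv)⟩

theorem pvCgood_iff (nums : List Int) (E : List (Int × Int)) (j : Nat) :
    pvCgood nums E j = true ↔
      ∀ e ∈ E, e.2 = nums.getD j 0 → e.1 ∈ nums ∧ nums.idxOf e.1 < j := by
  simp [pvCgood, List.all_eq_true, or_iff_not_imp_left]

theorem pvPgood_iff (nums : List Int) (E : List (Int × Int)) (j : Nat) :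
    pvPgood nums E j = true ↔ (nums.getD (j - 1) 0, nums.getD j 0) ∈ E := by
  simp [pvPgood]

theorem pvGood_pos (nums : List Int) (E : List (Int × Int)) (j : Nat) (hj : j ≠ 0) :
    pvGood nums E j = true ↔
      (pvCgood nums E j = true ∧ pvPgood nums E j = true) := by
  simp [pvGood, hj]

theorem pvCountPos (p : (Int × Int) → Bool) (l : List (Int × Int)) :
    1 ≤ l.countP p ↔ ∃ e ∈ l, p e = true := by
  constructor
  · intro h
    by_contra hno
    push_neg at hno
    have : l.countP p = 0 := List.countP_eq_zero.2 (by simpa using hno)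
    omega
  · rintro ⟨e, he, hpe⟩
    by_contra h0
    have hz : l.countP p = 0 := by omega
    have hne := List.countP_eq_zero.1 hz e he
    exact hne hpe

theorem pvSingletonOf {α : Type} (l : List α) (w : α) (hnd : l.Nodup) (hw : w ∈ l)
    (hall : ∀ y ∈ l, y = w) : l = [w] := by
  cases l with
  | nil => cases hw
  | cons a t =>
    have ha : a = w := hall a (by simp)
    subst ha
    have ht : t = [] := by
      rw [List.eq_nil_iff_forall_not_mem]
      intro y hy
      have hya : y = a := hall y (by simp [hy])
      rw [List.nodup_cons] at hnd
      exact hnd.1 (hya ▸ hy)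
    rw [ht]

-- one pop from the invariant state: new in-degrees and which nodes get pushed
theorem pvStep (nums : List Int) (E : List (Int × Int)) (graph : PySem.Dict Int (List Int))
    (hnd : nums.Nodup)
    (hsrc : ∀ e ∈ E, e.1 ∈ nums) (htgt : ∀ e ∈ E, e.2 ∈ nums)
    (hg : ∀ u, graph.getD u [] = (E.filter (fun e => e.1 == u)).map (·.2))
    (i : Nat) (d : PySem.Dict Int Int) (hi : i < nums.length)
    (hC : ∀ j, j ≤ i → pvCgood nums E j = true)
    (hD : ∀ v, d.getD v 0 = ((E.countP fun e => e.2 == v && decide (i ≤ nums.idxOf e.1)) : Int)) :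
    (∀ v, ((graph.getD (nums.getD i 0) []).foldl pvDecStep (d, [])).1.getD v 0 =
        ((E.countP fun e => e.2 == v && decide (i + 1 ≤ nums.idxOf e.1)) : Int)) ∧
    ∃ pushed, ((graph.getD (nums.getD i 0) []).foldl pvDecStep (d, [])).2 = pushed ∧
      pushed.Nodup ∧
      (∀ v, v ∈ pushed ↔ ∃ j, j < nums.length ∧ i < j ∧ v = nums.getD j 0 ∧
          (∀ e ∈ E, e.2 = v → nums.idxOf e.1 ≤ i) ∧ ((nums.getD i 0, v) ∈ E)) := by
  have hgete : nums.getD i 0 = nums[i] := List.getD_eq_getElem _ _ hi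
  have hxi : nums.idxOf (nums.getD i 0) = i := by
    rw [hgete]; exact hnd.idxOf_getElem i hi
  have hiff : ∀ e ∈ E, (e.1 = nums.getD i 0 ↔ nums.idxOf e.1 = i) := by
    intro e he
    constructor
    · intro h; rw [h, hxi]
    · intro h
      have h1 : e.1 ∈ nums := hsrc e he
      have hlt := List.idxOf_lt_length_iff.2 h1
      subst h
      rw [hgete, List.getElem_idxOf]
  obtain ⟨h1, pushed, h2, h3, h4⟩ := pvInner (graph.getD (nums.getD i 0) []) d []
  have hcount : ∀ v, (graph.getD (nums.getD i 0) []).count v =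
      E.countP (fun e => e.2 == v && e.1 == nums.getD i 0) := by
    intro v
    rw [hg, List.count_eq_countP, List.countP_map, List.countP_filter]
    rfl
  have hsplit : ∀ v, d.getD v 0 =
      ((E.countP fun e => e.2 == v && decide (i + 1 ≤ nums.idxOf e.1)) : Int) +
      ((E.countP fun e => e.2 == v && e.1 == nums.getD i 0) : Int) := by
    intro v
    rw [hD v]
    rw [pvCountPSplit (fun e => e.2 == v && decide (i ≤ nums.idxOf e.1))
      (fun e => e.2 == v && decide (i + 1 ≤ nums.idxOf e.1))
      (fun e => e.2 == v && e.1 == nums.getD i 0) E ?_]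
    · push_cast; ring
    · intro e he
      constructor
      · cases h2v : (e.2 == v) with
        | false => simp [h2v]
        | true =>
          simp only [h2v, Bool.true_and]
          by_cases hcase : e.1 = nums.getD i 0
          · have hidx : nums.idxOf e.1 = i := (hiff e he).1 hcase
            have hbeq : (e.1 == nums.getD i 0) = true := beq_iff_eq.mpr hcase
            rw [hbeq, Bool.or_true, hidx]
            simp
          · have hne : nums.idxOf e.1 ≠ i := fun hh => hcase ((hiff e he).2 hh)
            have hbeq : (e.1 == nums.getD i 0) = false := beq_eq_false_iff_ne.mpr hcase
            rw [hbeq, Bool.or_false]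
            by_cases hle : i + 1 ≤ nums.idxOf e.1
            · have hle' : i ≤ nums.idxOf e.1 := by omega
              simp [hle, hle']
            · have hle' : ¬ (i ≤ nums.idxOf e.1) := by omega
              simp [hle, hle']
      · rintro ⟨hq, hr⟩
        simp only [Bool.and_eq_true, beq_iff_eq, decide_eq_true_eq] at hq hr
        have : nums.idxOf e.1 = i := (hiff e he).1 hr.2
        omega
  refine ⟨?_, pushed, (by rw [h2]; rfl), h3, ?_⟩
  · intro v
    rw [h1 v, hsplit v, hcount v]
    push_cast; ring
  · intro v
    rw [h4 v, hsplit v, hcount v]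
    constructor
    · rintro ⟨ha, hb⟩
      have hA : E.countP (fun e => e.2 == v && decide (i + 1 ≤ nums.idxOf e.1)) = 0 := by
        push_cast at ha hb; omega
      have hB : 1 ≤ E.countP (fun e => e.2 == v && e.1 == nums.getD i 0) := by
        push_cast at ha hb; omega
      obtain ⟨e, he, hpe⟩ := (pvCountPos _ _).1 hB
      simp only [Bool.and_eq_true, beq_iff_eq] at hpe
      have heq : e = (nums.getD i 0, v) := by
        cases e; simp_all
      have hvmem : v ∈ nums := by
        have := htgt e he; rwa [hpe.1] at this
      have hjlt := List.idxOf_lt_length_iff.2 hvmem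
      have hvj : v = nums.getD (nums.idxOf v) 0 := by
        rw [List.getD_eq_getElem _ _ hjlt, List.getElem_idxOf]
      have hT : ∀ e' ∈ E, e'.2 = v → nums.idxOf e'.1 ≤ i := by
        intro e' he' h2'
        have := List.countP_eq_zero.1 hA e' he'
        simp only [Bool.and_eq_true, beq_iff_eq, decide_eq_true_eq, not_and] at this
        have := this h2'
        omega
      have hKmem : (nums.getD i 0, v) ∈ E := heq ▸ he
      have hilt : i < nums.idxOf v := by
        by_contra hle
        push_neg at hle
        have hCj := (pvCgood_iff nums E (nums.idxOf v)).1 (hC _ hle) (nums.getD i 0, v)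
          hKmem (by simpa using hvj)
        rw [hxi] at hCj
        omega
      exact ⟨nums.idxOf v, hjlt, hilt, hvj, hT, hKmem⟩
    · rintro ⟨j, hj, hij, hvj, hT, hK⟩
      have hA : E.countP (fun e => e.2 == v && decide (i + 1 ≤ nums.idxOf e.1)) = 0 := by
        apply List.countP_eq_zero.2
        intro e he
        simp only [Bool.and_eq_true, beq_iff_eq, decide_eq_true_eq, not_and]
        intro h2'
        have := hT e he h2'
        omega
      have hB : 1 ≤ E.countP (fun e => e.2 == v && e.1 == nums.getD i 0) := by
        exact (pvCountPos _ _).2 ⟨(nums.getD i 0, v), hK, by simp⟩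
      push_cast
      omega

-- the main loop lemma: from the state reached after i correct pops, A's loop returns
-- true exactly when every later position satisfies Cb/Pb
theorem pvRun (nums : List Int) (E : List (Int × Int)) (graph : PySem.Dict Int (List Int))
    (hnd : nums.Nodup)
    (hsrc : ∀ e ∈ E, e.1 ∈ nums) (htgt : ∀ e ∈ E, e.2 ∈ nums)
    (hg : ∀ u, graph.getD u [] = (E.filter (fun e => e.1 == u)).map (·.2)) :
    ∀ fuel i (d : PySem.Dict Int Int), i < nums.length → nums.length - i ≤ fuel →
    (∀ j, j ≤ i → pvCgood nums E j = true) →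
    (∀ v, d.getD v 0 = ((E.countP fun e => e.2 == v && decide (i ≤ nums.idxOf e.1)) : Int)) →
    pvKahn nums graph fuel d [nums.getD i 0] i =
      decide (∀ j, j < nums.length → i < j → pvGood nums E j = true) := by
  intro fuel
  induction fuel with
  | zero => intro i d hi hfuel hC hD; omega
  | succ fuel ih =>
    intro i d hi hfuel hC hD
    have hwj : ∀ j, j < nums.length → nums.idxOf (nums.getD j 0) = j := by
      intro j hj; rw [List.getD_eq_getElem _ _ hj]; exact hnd.idxOf_getElem j hj
    rw [pvKahn_succ]
    rw [if_neg (by simp)]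
    rw [if_neg (show ¬(nums.getD i 0 ≠ PySem.List.pyGetD nums (i : Int) 0) by
      rw [PySem.List.pyGetD_natCast]; simp)]
    obtain ⟨hd', pushed, hq2, hpnd, hmem⟩ := pvStep nums E graph hnd hsrc htgt hg i d hi hC hD
    rw [hq2]
    have hwin : pvCgood nums E (i + 1) = true → pvPgood nums E (i + 1) = true →
        i + 1 < nums.length → nums.getD (i + 1) 0 ∈ pushed := by
      intro hCg hPg hlt
      refine (hmem _).2 ⟨i + 1, hlt, by omega, rfl, ?_, ?_⟩
      · intro e he h2
        have := ((pvCgood_iff nums E (i + 1)).1 hCg) e he h2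
        omega
      · have := (pvPgood_iff nums E (i + 1)).1 hPg
        simpa using this
    have hpushGood : ∀ v ∈ pushed,
        (∀ k, k < nums.length → i < k → k ≠ i + 1 → pvGood nums E k = true) →
        v = nums.getD (i + 1) 0 := by
      intro v hv hGall
      obtain ⟨j, hj, hij, hvj, hT, hK⟩ := (hmem v).1 hv
      by_contra hne
      have hjne : j ≠ i + 1 := fun h => hne (by rw [hvj, h])
      have hGj := hGall j hj hij hjne
      have hPg := ((pvGood_pos nums E j (by omega)).1 hGj).2
      have hedge := (pvPgood_iff nums E j).1 hPg
      have hle := hT _ hedge hvj.symm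
      rw [hwj (j - 1) (by omega)] at hle
      omega
    have hpushBack : nums.getD (i + 1) 0 ∈ pushed → i + 1 < nums.length →
        pvGood nums E (i + 1) = true := by
      intro hv hlt
      obtain ⟨j, hj, hij, hvj, hT, hK⟩ := (hmem _).1 hv
      have hjeq : j = i + 1 := by
        have h1' := hwj j hj
        rw [← hvj] at h1'
        rw [hwj (i + 1) hlt] at h1'
        omega
      subst hjeq
      rw [pvGood_pos nums E (i + 1) (by omega)]
      constructor
      · rw [pvCgood_iff]
        intro e he h2
        refine ⟨hsrc e he, ?_⟩
        have := hT e he (by rw [← hvj] at h2 ⊢; exact h2)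
        omega
      · rw [pvPgood_iff]
        simpa using hK
    by_cases hall : ∀ j, j < nums.length → i < j → pvGood nums E j = true
    · rw [decide_eq_true hall]
      by_cases hend : i + 1 < nums.length
      · have hGi1 := hall (i + 1) hend (by omega)
        obtain ⟨hCg, hPg⟩ := (pvGood_pos nums E (i + 1) (by omega)).1 hGi1
        have hpe : pushed = [nums.getD (i + 1) 0] :=
          pvSingletonOf _ _ hpnd (hwin hCg hPg hend)
            (fun y hy => hpushGood y hy (fun k hk hik _ => hall k hk hik))
        rw [hpe]
        rw [ih (i + 1) _ hend (by omega) ?hCx hd']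
        · exact decide_eq_true (fun j hj hij => hall j hj (by omega))
        case hCx =>
          intro j hjle
          rcases Nat.lt_or_ge j (i + 1) with h | h
          · exact hC j (by omega)
          · have hj1 : j = i + 1 := by omega
            rw [hj1]; exact hCg
      · have hpe : pushed = [] := by
          rw [List.eq_nil_iff_forall_not_mem]
          intro v hv
          obtain ⟨j, hj, hij, _, _, _⟩ := (hmem v).1 hv
          omega
        rw [hpe, pvKahn_nil]
        exact decide_eq_true (by omega)
    · rw [decide_eq_false hall]
      have hex : ∃ j, j < nums.length ∧ i < j ∧ pvGood nums E j = false := by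
        push_neg at hall
        obtain ⟨j, hj, hij, hbad⟩ := hall
        exact ⟨j, hj, hij, by simpa using hbad⟩
      set m := Nat.find hex with hmdef
      have hspec : m < nums.length ∧ i < m ∧ pvGood nums E m = false := by
        rw [hmdef]; exact Nat.find_spec hex
      obtain ⟨hmlt, him, hmbad⟩ := hspec
      have hmin : ∀ k, k < m → k < nums.length → i < k → pvGood nums E k = true := by
        intro k hk hkn hik
        by_contra hkb
        rw [Bool.not_eq_true] at hkb
        exact Nat.find_min hex (hmdef ▸ hk) ⟨hkn, hik, hkb⟩
      by_cases hm1 : m = i + 1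
      · have hwnot : nums.getD (i + 1) 0 ∉ pushed := by
          intro hv
          have hgood := hpushBack hv (by omega)
          rw [hm1] at hmbad
          rw [hmbad] at hgood
          exact Bool.false_ne_true hgood
        have hneq : ∀ y ∈ pushed, y ≠ nums.getD (i + 1) 0 :=
          fun y hy he => hwnot (he ▸ hy)
        cases pushed with
        | nil =>
          rw [pvKahn_nil]
          exact decide_eq_false (by omega)
        | cons y rest =>
          cases rest with
          | nil =>
            cases fuel with
            | zero => omega
            | succ f =>
              rw [pvKahn_succ]
              rw [if_neg (by simp)]
              rw [if_pos ?hne2]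
              case hne2 =>
                rw [PySem.List.pyGetD_natCast]
                exact hneq y (by simp)
          | cons y2 rest2 =>
            cases fuel with
            | zero => omega
            | succ f =>
              rw [pvKahn_succ]
              have hlen2 : 1 < (y2 :: rest2).length + 1 := by
                rw [List.length_cons]; omega
              rw [if_pos (by rw [List.length_cons]; exact hlen2)]
      · have hi1m : i + 1 < m := by omega
        have hi1n : i + 1 < nums.length := by omega
        have hG1 := hmin (i + 1) hi1m hi1n (by omega)
        obtain ⟨hCg, hPg⟩ := (pvGood_pos nums E (i + 1) (by omega)).1 hG1
        have hwin1 := hwin hCg hPg hi1n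
        cases pushed with
        | nil => exact absurd hwin1 (by simp)
        | cons y rest =>
          cases rest with
          | nil =>
            have hyw : y = nums.getD (i + 1) 0 :=
              (List.mem_singleton.1 hwin1).symm
            rw [hyw]
            rw [ih (i + 1) _ hi1n (by omega) ?hCx2 hd']
            · rw [decide_eq_false]
              intro hforall
              have hgm := hforall m hmlt hi1m
              rw [hmbad] at hgm
              exact Bool.false_ne_true hgm
            case hCx2 =>
              intro j hjle
              rcases Nat.lt_or_ge j (i + 1) with h | h
              · exact hC j (by omega)
              · have hj1 : j = i + 1 := by omega
                rw [hj1]; exact hCg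
          | cons y2 rest2 =>
            cases fuel with
            | zero => omega
            | succ f =>
              rw [pvKahn_succ]
              have hlen2 : 1 < (y2 :: rest2).length + 1 := by
                rw [List.length_cons]; omega
              rw [if_pos (by rw [List.length_cons]; exact hlen2)]

theorem pvBounds (nums : List Int) (sequences : List (List Int))
    (hpre : Pre_solution_function_name nums sequences) :
    ∀ e ∈ pvE sequences, e.1 ∈ pvNodes nums.length ∧ e.2 ∈ pvNodes nums.length := by
  intro e he
  obtain ⟨seq, hseq, hmem⟩ := List.mem_flatMap.1 he
  obtain ⟨i, hi, hei⟩ := List.mem_map.1 hmem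
  obtain ⟨hi0, hi1⟩ := PySem.List.mem_pyRange_one.1 hi
  have hlen : 2 ≤ seq.length := by omega
  have h1 : e.1 ∈ seq := by
    rw [← hei]; dsimp only
    rw [PySem.List.pyGetD_eq_getElem seq 0 hi0 (by omega)]; exact List.getElem_mem _
  have h2 : e.2 ∈ seq := by
    rw [← hei]; dsimp only
    rw [PySem.List.pyGetD_eq_getElem seq 0 (by omega) (by omega)]; exact List.getElem_mem _
  have b1 := hpre seq hseq hlen e.1 h1
  have b2 := hpre seq hseq hlen e.2 h2
  constructor <;> rw [pvNodes, PySem.List.mem_pyRange_one] <;> omega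

-- the built graph: adjacency lists, in-degrees, and the key list
def pvPairStep (p : PySem.Dict Int (List Int) × PySem.Dict Int Int) (e : Int × Int) :
    PySem.Dict Int (List Int) × PySem.Dict Int Int :=
  (p.1.modify e.1 [] (· ++ [e.2]), p.2.modify e.2 0 (· + 1))

def pvInitG (n : Nat) : PySem.Dict Int (List Int) :=
  (PySem.List.pyRange 1 ((n : Int) + 1) 1).foldl (fun d i => d.insert i ([] : List Int)) PySem.Dict.empty

def pvInitD (n : Nat) : PySem.Dict Int Int :=
  (PySem.List.pyRange 1 ((n : Int) + 1) 1).foldl (fun d i => d.insert i (0 : Int)) PySem.Dict.empty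

theorem pvSeqFold (p : PySem.Dict Int (List Int) × PySem.Dict Int Int) (seq : List Int) :
    (PySem.List.pyRange 0 ((seq.length : Int) - 1) 1).foldl (fun p i =>
        let u := PySem.List.pyGetD seq i 0
        let v := PySem.List.pyGetD seq (i + 1) 0
        (p.1.modify u [] (· ++ [v]), p.2.modify v 0 (· + 1))) p
      = (pvPairsOf seq).foldl pvPairStep p := by
  rw [pvPairsOf, List.foldl_map]; rfl

theorem pvBuildFlat (n : Nat) (sequences : List (List Int)) :
    pvBuild n sequences = (pvE sequences).foldl pvPairStep (pvInitG n, pvInitD n) := by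
  rw [pvBuild]
  have hb : (fun (p : PySem.Dict Int (List Int) × PySem.Dict Int Int) (seq : List Int) =>
      (PySem.List.pyRange 0 ((seq.length : Int) - 1) 1).foldl (fun p i =>
        let u := PySem.List.pyGetD seq i 0
        let v := PySem.List.pyGetD seq (i + 1) 0
        (p.1.modify u [] (· ++ [v]), p.2.modify v 0 (· + 1))) p)
      = fun p seq => (pvPairsOf seq).foldl pvPairStep p :=
    funext fun p => funext fun seq => pvSeqFold p seq
  rw [hb, pvE, List.flatMap_def, List.foldl_flatten, List.foldl_map]
  rfl

theorem pvBuildSpec (nums : List Int) (sequences : List (List Int))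
    (hpre : Pre_solution_function_name nums sequences) :
    (∀ u, (pvBuild nums.length sequences).1.getD u [] =
        ((pvE sequences).filter (fun e => e.1 == u)).map (·.2)) ∧
    (∀ v, (pvBuild nums.length sequences).2.getD v 0 =
        (((pvE sequences).countP fun e => e.2 == v) : Int)) ∧
    (pvBuild nums.length sequences).2.keys = pvNodes nums.length ∧
    (pvBuild nums.length sequences).1.keys = pvNodes nums.length := by
  have hb := pvBounds nums sequences hpre
  have hsplit : pvBuild nums.length sequences =
      ((pvE sequences).foldl (fun g e => g.modify e.1 [] (· ++ [e.2])) (pvInitG nums.length),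
       (pvE sequences).foldl (fun d e => d.modify e.2 0 (· + 1)) (pvInitD nums.length)) := by
    rw [pvBuildFlat]
    exact PySem.List.foldl_prod_mk
      (fun (g : PySem.Dict Int (List Int)) (e : Int × Int) => g.modify e.1 [] (· ++ [e.2]))
      (fun (d : PySem.Dict Int Int) (e : Int × Int) => d.modify e.2 0 (· + 1))
      (pvE sequences) (pvInitG nums.length) (pvInitD nums.length)
  rw [hsplit]
  have hinit1 : ∀ u, (pvInitG nums.length).getD u [] = [] :=
    pvFoldInsertConst _ _ _ (fun v => by simp [pysem])
  have hinit2 : ∀ u, (pvInitD nums.length).getD u 0 = 0 :=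
    pvFoldInsertConst _ _ _ (fun v => by simp [pysem])
  refine ⟨fun u => ?_, fun v => ?_, ?_, ?_⟩
  · rw [PySem.Dict.getD_foldl_modify_append, hinit1]; simp
  · have hmapfold : (pvE sequences).foldl (fun d e => d.modify e.2 0 (· + 1)) (pvInitD nums.length)
        = ((pvE sequences).map (fun e => e.2)).foldl
            (fun (d : PySem.Dict Int Int) (x : Int) => d.modify x 0 (· + 1)) (pvInitD nums.length) := by
      rw [List.foldl_map]
    rw [hmapfold, PySem.Dict.getD_foldl_modify_add_one, hinit2]
    rw [List.count_eq_countP, List.countP_map, zero_add]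
    rfl
  · rw [PySem.Dict.keys_foldl_modify_key (pvE sequences) (fun e => e.2) 0
        (fun _ _ => (· + 1)) (pvInitD nums.length)]
    have hkeys0 : (pvInitD nums.length).keys = pvNodes nums.length := by
      rw [pvInitD, PySem.Dict.keys_foldl_insert _ (fun _ _ => (0 : Int)),
        PySem.Dict.keys_empty, PySem.Set.update_nil_left,
        PySem.Set.ofList_eq_self_of_nodup _ (PySem.List.nodup_pyRange_one 1 _)]
      rfl
    rw [hkeys0, PySem.Set.update_eq_append_filter]
    have hnil : (List.filter (fun y => !(PySem.Set.contains (pvNodes nums.length) y))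
        (PySem.Set.ofList ((pvE sequences).map (fun e => e.2)))) = [] := by
      rw [List.filter_eq_nil_iff]
      intro y hy
      obtain ⟨e, he, hye⟩ := List.mem_map.1 ((PySem.Set.mem_ofList _ _).1 hy)
      have hmem : y ∈ pvNodes nums.length := hye ▸ (hb e he).2
      simpa using hmem
    rw [hnil, List.append_nil]
  · rw [PySem.Dict.keys_foldl_modify_key (pvE sequences) (fun e => e.1) []
        (fun _ e => (· ++ [e.2])) (pvInitG nums.length)]
    have hkeys0 : (pvInitG nums.length).keys = pvNodes nums.length := by
      rw [pvInitG, PySem.Dict.keys_foldl_insert _ (fun _ _ => ([] : List Int)),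
        PySem.Dict.keys_empty, PySem.Set.update_nil_left,
        PySem.Set.ofList_eq_self_of_nodup _ (PySem.List.nodup_pyRange_one 1 _)]
      rfl
    rw [hkeys0, PySem.Set.update_eq_append_filter]
    have hnil : (List.filter (fun y => !(PySem.Set.contains (pvNodes nums.length) y))
        (PySem.Set.ofList ((pvE sequences).map (fun e => e.1)))) = [] := by
      rw [List.filter_eq_nil_iff]
      intro y hy
      obtain ⟨e, he, hye⟩ := List.mem_map.1 ((PySem.Set.mem_ofList _ _).1 hy)
      have hmem : y ∈ pvNodes nums.length := hye ▸ (hb e he).1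
      simpa using hmem
    rw [hnil, List.append_nil]

-- v is an out-neighbour of u in the built adjacency list iff (u, v) is an edge
theorem pvMemAdj (E : List (Int × Int)) (u v : Int) :
    v ∈ (E.filter (fun e => e.1 == u)).map (·.2) ↔ (u, v) ∈ E := by
  simp only [List.mem_map, List.mem_filter, beq_iff_eq]
  constructor
  · rintro ⟨⟨a, b⟩, ⟨he, h1⟩, h2⟩
    cases h1; cases h2; exact he
  · intro h
    exact ⟨(u, v), ⟨h, rfl⟩, rfl⟩

theorem pvA_eq (nums : List Int) (sequences : List (List Int))
    (hpre : Pre_solution_function_name nums sequences)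
    (hperm : nums.Perm (pvNodes nums.length)) :
    solution_function_name nums sequences =
      decide (∀ j, j < nums.length → pvGood nums (pvE sequences) j = true) := by
  obtain ⟨hgA, hdA, hkA, hkG⟩ := pvBuildSpec nums sequences hpre
  have hnd : nums.Nodup := hperm.nodup_iff.2 (PySem.List.nodup_pyRange_one 1 _)
  have hsrc : ∀ e ∈ pvE sequences, e.1 ∈ nums :=
    fun e he => hperm.mem_iff.2 ((pvBounds nums sequences hpre e he).1)
  have htgt : ∀ e ∈ pvE sequences, e.2 ∈ nums :=
    fun e he => hperm.mem_iff.2 ((pvBounds nums sequences hpre e he).2)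
  show pvKahn nums (pvBuild nums.length sequences).1 (nums.length + 1)
      (pvBuild nums.length sequences).2
      ((pvBuild nums.length sequences).2.keys.filter
        (fun node => (pvBuild nums.length sequences).2.getD node 0 == 0)) 0 = _
  rw [hkA]
  by_cases hn : nums.length = 0
  · rw [pvNodes, PySem.List.pyRange_one_eq_nil (by omega), List.filter_nil, pvKahn_nil]
    have h1 : (0 = nums.length) := hn.symm
    rw [decide_eq_true h1]
    exact (decide_eq_true (fun j hj => by omega)).symm
  · -- n ≥ 1
    have hwj : ∀ j, j < nums.length → nums.idxOf (nums.getD j 0) = j := by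
      intro j hj; rw [List.getD_eq_getElem _ _ hj]; exact hnd.idxOf_getElem j hj
    have hD0 : ∀ v, (pvBuild nums.length sequences).2.getD v 0 =
        (((pvE sequences).countP fun e => e.2 == v && decide (0 ≤ nums.idxOf e.1)) : Int) := by
      intro v
      rw [hdA v]
      congr 1
      apply List.countP_congr
      intro e he
      simp
    have hzero_iff : ∀ v, ((pvBuild nums.length sequences).2.getD v 0 = 0 ↔
        (pvE sequences).countP (fun e => e.2 == v) = 0) := by
      intro v
      rw [hdA v]
      norm_cast
    have hq0nd : ((pvNodes nums.length).filter
        (fun node => (pvBuild nums.length sequences).2.getD node 0 == 0)).Nodup :=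
      (PySem.List.nodup_pyRange_one 1 _).filter _
    have hqmem : ∀ v, v ∈ (pvNodes nums.length).filter
        (fun node => (pvBuild nums.length sequences).2.getD node 0 == 0) ↔
        (v ∈ pvNodes nums.length ∧ (pvBuild nums.length sequences).2.getD v 0 = 0) := by
      intro v
      rw [List.mem_filter]
      simp
    have hw0mem : nums.getD 0 0 ∈ nums := by
      rw [List.getD_eq_getElem _ _ (by omega)]; exact List.getElem_mem _
    have hw0 : nums.getD 0 0 ∈ pvNodes nums.length := hperm.mem_iff.1 hw0mem
    have hC0iff : pvCgood nums (pvE sequences) 0 = true ↔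
        (pvBuild nums.length sequences).2.getD (nums.getD 0 0) 0 = 0 := by
      rw [pvCgood_iff, hzero_iff]
      constructor
      · intro h
        apply List.countP_eq_zero.2
        intro e he
        simp only [beq_iff_eq]
        intro h2
        have := (h e he h2).2
        omega
      · intro h0 e he h2
        exfalso
        have : 1 ≤ (pvE sequences).countP (fun e => e.2 == nums.getD 0 0) :=
          (pvCountPos _ _).2 ⟨e, he, beq_iff_eq.mpr h2⟩
        omega
    have hidx0 : ∀ v ∈ nums, nums.idxOf v = 0 → v = nums.getD 0 0 := by
      intro v hv h0
      have hlt := List.idxOf_lt_length_iff.2 hv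
      have hgl := List.getElem_idxOf hlt
      rw [List.getD_eq_getElem _ _ (by omega)]
      simp only [h0] at hgl
      exact hgl.symm
    have hbadj : ∀ y, y ∈ pvNodes nums.length →
        (pvBuild nums.length sequences).2.getD y 0 = 0 → nums.idxOf y ≠ 0 →
        (pvGood nums (pvE sequences) (nums.idxOf y) = false ∧ nums.idxOf y < nums.length) := by
      intro y hy h0 hj0
      have hymem : y ∈ nums := hperm.mem_iff.2 hy
      have hjlt : nums.idxOf y < nums.length := List.idxOf_lt_length_iff.2 hymem
      have hPg : pvPgood nums (pvE sequences) (nums.idxOf y) = false := by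
        cases hpg : pvPgood nums (pvE sequences) (nums.idxOf y) with
        | false => rfl
        | true =>
          exfalso
          have hedge := (pvPgood_iff nums (pvE sequences) (nums.idxOf y)).1 hpg
          have hy2 : nums.getD (nums.idxOf y) 0 = y := by
            rw [List.getD_eq_getElem _ _ hjlt, List.getElem_idxOf]
          have hcnt : 1 ≤ (pvE sequences).countP (fun e => e.2 == y) :=
            (pvCountPos _ _).2 ⟨_, hedge, beq_iff_eq.mpr hy2⟩
          have := (hzero_iff y).1 h0
          omega
      refine ⟨?_, hjlt⟩
      simp [pvGood, hj0, hPg]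
    cases hq : (pvNodes nums.length).filter
        (fun node => (pvBuild nums.length sequences).2.getD node 0 == 0) with
    | nil =>
      rw [pvKahn_nil]
      have hnq : ¬ ((pvBuild nums.length sequences).2.getD (nums.getD 0 0) 0 = 0) := by
        intro h0
        have := (hqmem (nums.getD 0 0)).2 ⟨hw0, h0⟩
        rw [hq] at this
        cases this
      have hC0 : pvGood nums (pvE sequences) 0 = false := by
        have : pvCgood nums (pvE sequences) 0 = false := by
          cases hcg : pvCgood nums (pvE sequences) 0 with
          | false => rfl
          | true => exact absurd (hC0iff.1 hcg) hnq
        simp [pvGood, this]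
      rw [decide_eq_false (by omega)]
      symm
      apply decide_eq_false
      intro hf
      have := hf 0 (by omega)
      rw [hC0] at this
      exact Bool.false_ne_true this
    | cons y rest =>
      have hy0 := (hqmem y).1 (by rw [hq]; simp)
      cases rest with
      | nil =>
        by_cases hyx : y = nums.getD 0 0
        · subst hyx
          rw [pvRun nums (pvE sequences) (pvBuild nums.length sequences).1 hnd hsrc htgt hgA
            (nums.length + 1) 0 (pvBuild nums.length sequences).2 (by omega) (by omega)
            (fun j hj => by
              have hj0 : j = 0 := by omega
              rw [hj0]
              exact hC0iff.2 hy0.2)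
            hD0]
          rw [decide_eq_decide]
          constructor
          · intro h j hj
            rcases Nat.eq_zero_or_pos j with h0 | hpos
            · rw [h0]
              have hcg := hC0iff.2 hy0.2
              simp [pvGood, hcg]
            · exact h j hj (by omega)
          · intro h j hj _
            exact h j hj
        · rw [pvKahn_succ]
          rw [if_neg (by simp)]
          rw [if_pos (by rw [PySem.List.pyGetD_natCast]; exact hyx)]
          have hjy0 : nums.idxOf y ≠ 0 := by
            intro h0
            exact hyx (hidx0 y (hperm.mem_iff.2 hy0.1) h0)
          obtain ⟨hbad, hlt⟩ := hbadj y hy0.1 hy0.2 hjy0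
          symm
          apply decide_eq_false
          intro hf
          have := hf _ hlt
          rw [hbad] at this
          exact Bool.false_ne_true this
      | cons y2 rest2 =>
        rw [pvKahn_succ]
        rw [if_pos (by rw [List.length_cons, List.length_cons]; omega)]
        have hy20 := (hqmem y2).1 (by rw [hq]; simp)
        have hne : y ≠ y2 := by
          have := hq ▸ hq0nd
          rw [List.nodup_cons] at this
          intro h
          exact this.1 (h ▸ (by simp : y2 ∈ y2 :: rest2))
        have hex2 : ∃ z, z ∈ pvNodes nums.length ∧
            (pvBuild nums.length sequences).2.getD z 0 = 0 ∧ nums.idxOf z ≠ 0 := by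
          by_cases hjy : nums.idxOf y = 0
          · refine ⟨y2, hy20.1, hy20.2, ?_⟩
            intro h0
            have h1' := hidx0 y (hperm.mem_iff.2 hy0.1) hjy
            have h2' := hidx0 y2 (hperm.mem_iff.2 hy20.1) h0
            exact hne (h1'.trans h2'.symm)
          · exact ⟨y, hy0.1, hy0.2, hjy⟩
        obtain ⟨z, hz1, hz2, hz3⟩ := hex2
        obtain ⟨hbad, hlt⟩ := hbadj z hz1 hz2 hz3
        symm
        apply decide_eq_false
        intro hf
        have := hf _ hlt
        rw [hbad] at this
        exact Bool.false_ne_true this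

theorem pvA_false (nums : List Int) (sequences : List (List Int))
    (hpre : Pre_solution_function_name nums sequences)
    (hperm : ¬ nums.Perm (pvNodes nums.length)) :
    solution_function_name nums sequences = false := by
  obtain ⟨hgA, hdA, hkA, hkG⟩ := pvBuildSpec nums sequences hpre
  cases hres : solution_function_name nums sequences with
  | false => rfl
  | true =>
    exfalso
    rw [solution_function_name] at hres
    have htgt : ∀ u, ∀ x ∈ (pvBuild nums.length sequences).1.getD u [],
        x ∈ pvNodes nums.length := by
      intro u x hx
      rw [hgA u] at hx
      obtain ⟨e, he, hxe⟩ := List.mem_map.1 hx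
      exact hxe ▸ (pvBounds nums sequences hpre e (List.mem_filter.1 he).1).2
    have hqnd : ((pvBuild nums.length sequences).2.keys.filter
        (fun node => (pvBuild nums.length sequences).2.getD node 0 == 0)).Nodup := by
      rw [hkA]; exact (PySem.List.nodup_pyRange_one 1 _).filter _
    have hqinv : ∀ v ∈ (pvBuild nums.length sequences).2.keys.filter
        (fun node => (pvBuild nums.length sequences).2.getD node 0 == 0),
        v ∈ pvNodes nums.length ∧ (pvBuild nums.length sequences).2.getD v 0 ≤ 0 := by
      intro v hv
      obtain ⟨hvk, hvz⟩ := List.mem_filter.1 hv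
      refine ⟨hkA ▸ hvk, ?_⟩
      have : (pvBuild nums.length sequences).2.getD v 0 = 0 := by simpa using hvz
      omega
    obtain ⟨_, hnd, hmemn, _⟩ := pvTrace nums (pvBuild nums.length sequences).1 htgt
      (nums.length + 1) (pvBuild nums.length sequences).2 _ 0 hqnd hqinv hres
    rw [List.drop_zero] at hnd hmemn
    apply hperm
    have hlen : (pvNodes nums.length).length ≤ nums.length := by
      simp [pvNodes, PySem.List.length_pyRange_one]
    exact (hnd.subperm hmemn).perm_of_length_le hlen

theorem pvB_eq (nums : List Int) (sequences : List (List Int))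
    (hpre : Pre_solution_function_name nums sequences)
    (hperm : nums.Perm (pvNodes nums.length)) :
    solution_function_name_alt nums sequences =
      decide (∀ j, j < nums.length → pvGood nums (pvE sequences) j = true) := by
  obtain ⟨hgA, hdA, hkA, hkG⟩ := pvBuildSpec nums sequences hpre
  have hnd : nums.Nodup := hperm.nodup_iff.2 (PySem.List.nodup_pyRange_one 1 _)
  have hsrc : ∀ e ∈ pvE sequences, e.1 ∈ nums :=
    fun e he => hperm.mem_iff.2 ((pvBounds nums sequences hpre e he).1)
  have htgt : ∀ e ∈ pvE sequences, e.2 ∈ nums :=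
    fun e he => hperm.mem_iff.2 ((pvBounds nums sequences hpre e he).2)
  have hwj : ∀ j, j < nums.length → nums.idxOf (nums.getD j 0) = j := by
    intro j hj; rw [List.getD_eq_getElem _ _ hj]; exact hnd.idxOf_getElem j hj
  have hsorted : PySem.List.sorted nums (fun x => x) false =
      PySem.List.pyRange 1 ((nums.length : Int) + 1) 1 :=
    PySem.List.sorted_id_eq_of_perm_of_pairwise nums _ hperm.symm
      ((PySem.List.pairwise_lt_pyRange_one 1 _).imp le_of_lt)
  show (if PySem.List.sorted nums (fun x => x) false ≠
        PySem.List.pyRange 1 ((nums.length : Int) + 1) 1 then false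
      else if ¬ ((pvBuild nums.length sequences).1.keys.all fun u =>
          ((pvBuild nums.length sequences).1.getD u []).all fun v =>
            decide (((PySem.List.enumerate nums 0).foldl (fun d p => d.insert p.2 p.1)
                PySem.Dict.empty).getD u 0 <
              ((PySem.List.enumerate nums 0).foldl (fun d p => d.insert p.2 p.1)
                PySem.Dict.empty).getD v 0)) then false
      else (nums.zip (nums.drop 1)).all fun p =>
        decide (p.2 ∈ (pvBuild nums.length sequences).1.getD p.1 [])) = _
  rw [if_neg (by rw [hsorted]; simp)]
  have hposGen : ∀ (l : List Int) (s : Int) (dd : PySem.Dict Int Int), l.Nodup →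
      (∀ v ∈ l, dd.contains v = false) →
      (∀ v ∈ l, ((PySem.List.enumerate l s).foldl (fun d p => d.insert p.2 p.1) dd).get? v
          = some (s + (l.idxOf v : Int))) ∧
      (∀ v, v ∉ l →
        ((PySem.List.enumerate l s).foldl (fun d p => d.insert p.2 p.1) dd).get? v
          = dd.get? v) := by
    intro l
    induction l with
    | nil =>
      intro s dd _ _
      exact ⟨fun v hv => absurd hv (by simp), fun v _ => by rw [PySem.List.enumerate_nil]; rfl⟩
    | cons x t ih =>
      intro s dd hl hfresh
      rw [PySem.List.enumerate_cons, List.foldl_cons]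
      have hxt : x ∉ t := (List.nodup_cons.1 hl).1
      have hnt : t.Nodup := (List.nodup_cons.1 hl).2
      obtain ⟨ih1, ih2⟩ := ih (s + 1) (dd.insert x s) hnt (fun v hv => by
        rw [PySem.Dict.contains_insert]
        have hvx : v ≠ x := fun h => hxt (h ▸ hv)
        simp [hvx, hfresh v (by simp [hv])])
      constructor
      · intro v hv
        rcases List.mem_cons.1 hv with hvx | hvt
        · subst hvx
          rw [ih2 v hxt, PySem.Dict.get?_insert_self]
          simp
        · have hvx : v ≠ x := fun h => hxt (h ▸ hvt)
          rw [ih1 v hvt]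
          have hij : (x :: t).idxOf v = t.idxOf v + 1 := by
            simp [Ne.symm hvx]
          rw [hij]
          congr 1
          push_cast
          ring
      · intro v hvn
        have hvx : v ≠ x := fun h => hvn (by simp [h])
        have hvt : v ∉ t := fun h => hvn (by simp [h])
        rw [ih2 v hvt]
        simp [PySem.Dict.get?_insert, hvx]
  obtain ⟨hpos1', hpos2'⟩ := hposGen nums 0 PySem.Dict.empty hnd (fun v _ => by simp [pysem])
  have hpos1 : ∀ v ∈ nums,
      ((PySem.List.enumerate nums 0).foldl (fun d p => d.insert p.2 p.1)
        PySem.Dict.empty).get? v = some ((nums.idxOf v : Nat) : Int) := by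
    intro v hv
    rw [hpos1' v hv]
    congr 1
    ring
  have hgetD : ∀ v ∈ nums,
      ((PySem.List.enumerate nums 0).foldl (fun d p => d.insert p.2 p.1)
        PySem.Dict.empty).getD v 0 = ((nums.idxOf v : Nat) : Int) := by
    intro v hv
    rw [PySem.Dict.getD_eq_get?_getD, hpos1 v hv]
    rfl
  -- the u-then-neighbours double loop of B says exactly: every edge points forward
  have hfwd : ((pvBuild nums.length sequences).1.keys.all fun u =>
      ((pvBuild nums.length sequences).1.getD u []).all fun v =>
        decide (((PySem.List.enumerate nums 0).foldl (fun d p => d.insert p.2 p.1)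
            PySem.Dict.empty).getD u 0 <
          ((PySem.List.enumerate nums 0).foldl (fun d p => d.insert p.2 p.1)
            PySem.Dict.empty).getD v 0)) = true ↔
      (∀ j, j < nums.length → pvCgood nums (pvE sequences) j = true) := by
    rw [hkG, List.all_eq_true]
    constructor
    · intro h j hj
      rw [pvCgood_iff]
      intro e he h2
      have he1 : e.1 ∈ nums := hsrc e he
      have he2 : e.2 ∈ nums := htgt e he
      have hu := h e.1 (hperm.mem_iff.1 he1)
      rw [List.all_eq_true] at hu
      have hv := hu e.2 (by rw [hgA, pvMemAdj]; simpa using he)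
      rw [decide_eq_true_eq, hgetD e.1 he1, hgetD e.2 he2] at hv
      refine ⟨he1, ?_⟩
      have hj2 : nums.idxOf e.2 = j := by rw [h2]; exact hwj j hj
      rw [hj2] at hv
      exact_mod_cast hv
    · intro h u hu
      rw [List.all_eq_true]
      intro v hv
      rw [hgA, pvMemAdj] at hv
      have he1 : u ∈ nums := hsrc (u, v) hv
      have he2 : v ∈ nums := htgt (u, v) hv
      have hj2 : nums.idxOf v < nums.length := List.idxOf_lt_length_iff.2 he2
      have hCj := (pvCgood_iff nums (pvE sequences) (nums.idxOf v)).1 (h _ hj2)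
      have h22 : v = nums.getD (nums.idxOf v) 0 := by
        rw [List.getD_eq_getElem _ _ hj2, List.getElem_idxOf]
      have hlt := (hCj (u, v) hv h22).2
      rw [decide_eq_true_eq, hgetD u he1, hgetD v he2]
      exact_mod_cast hlt
  -- the zip loop of B says exactly: every consecutive pair of nums is an edge
  have hcov : ((nums.zip (nums.drop 1)).all fun p =>
      decide (p.2 ∈ (pvBuild nums.length sequences).1.getD p.1 [])) = true ↔
      (∀ j, j < nums.length → 1 ≤ j → pvPgood nums (pvE sequences) j = true) := by
    rw [List.all_eq_true]
    constructor
    · intro h j hj hj1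
      rw [pvPgood_iff]
      have hzl : j - 1 < (nums.zip (nums.drop 1)).length := by
        rw [List.length_zip, List.length_drop]; omega
      have hz : (nums.getD (j - 1) 0, nums.getD j 0) ∈ nums.zip (nums.drop 1) := by
        rw [List.mem_iff_getElem]
        refine ⟨j - 1, hzl, ?_⟩
        rw [List.getElem_zip, List.getElem_drop]
        have hd1 : nums.getD (j - 1) 0 = nums[j - 1]'(by omega) :=
          List.getD_eq_getElem _ _ (by omega)
        have hd2 : nums.getD j 0 = nums[j]'hj := List.getD_eq_getElem _ _ hj
        rw [hd1, hd2]
        have hix : 1 + (j - 1) = j := by omega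
        simp only [hix]
      have := h _ hz
      rwa [decide_eq_true_eq, hgA, pvMemAdj] at this
    · intro h p hp
      obtain ⟨i, hi, hpe⟩ := List.mem_iff_getElem.1 hp
      have hil : i + 1 < nums.length := by
        rw [List.length_zip, List.length_drop] at hi; omega
      rw [List.getElem_zip, List.getElem_drop] at hpe
      have hpg := (pvPgood_iff nums (pvE sequences) (i + 1)).1
        (h (i + 1) hil (by omega))
      rw [decide_eq_true_eq, hgA, pvMemAdj]
      have hd1 : nums.getD (i + 1 - 1) 0 = nums[i]'(by omega) :=
        List.getD_eq_getElem _ _ (by omega)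
      have hd2 : nums.getD (i + 1) 0 = nums[i + 1]'hil := List.getD_eq_getElem _ _ hil
      rw [hd1, hd2] at hpg
      have hpe1 : p.1 = nums[i]'(by omega) := by rw [← hpe]
      have hpe2 : p.2 = nums[1 + i]'(by omega) := by rw [← hpe]
      rw [hpe1, hpe2]
      have hge : nums[1 + i]'(by omega) = nums[i + 1]'hil := by congr 1; omega
      rw [hge]
      exact hpg
  cases hfb : ((pvBuild nums.length sequences).1.keys.all fun u =>
      ((pvBuild nums.length sequences).1.getD u []).all fun v =>
        decide (((PySem.List.enumerate nums 0).foldl (fun d p => d.insert p.2 p.1)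
            PySem.Dict.empty).getD u 0 <
          ((PySem.List.enumerate nums 0).foldl (fun d p => d.insert p.2 p.1)
            PySem.Dict.empty).getD v 0)) with
  | false =>
    rw [if_pos (by simp [hfb])]
    have hnc : ¬ ∀ j, j < nums.length → pvCgood nums (pvE sequences) j = true := by
      intro hc
      have := hfwd.2 hc
      rw [hfb] at this
      exact Bool.false_ne_true this
    push_neg at hnc
    obtain ⟨j, hj, hcb⟩ := hnc
    simp only [Bool.not_eq_true] at hcb
    symm
    apply decide_eq_false
    intro hforall
    have := hforall j hj
    rw [pvGood, hcb] at this
    simp at this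
  | true =>
    rw [if_neg (by simp [hfb])]
    have hCall := hfwd.1 hfb
    cases hcb : ((nums.zip (nums.drop 1)).all fun p =>
        decide (p.2 ∈ (pvBuild nums.length sequences).1.getD p.1 [])) with
    | true =>
      have hPall := hcov.1 hcb
      symm
      apply decide_eq_true
      intro j hj
      rcases Nat.eq_zero_or_pos j with h0 | h1
      · subst h0; simp [pvGood, hCall 0 hj]
      · rw [pvGood_pos nums _ j (by omega)]
        exact ⟨hCall j hj, hPall j hj (by omega)⟩
    | false =>
      have hnp : ¬ ∀ j, j < nums.length → 1 ≤ j → pvPgood nums (pvE sequences) j = true := by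
        intro hp
        have := hcov.2 hp
        rw [hcb] at this
        exact Bool.false_ne_true this
      push_neg at hnp
      obtain ⟨j, hj, hj1, hpb⟩ := hnp
      simp only [Bool.not_eq_true] at hpb
      symm
      apply decide_eq_false
      intro hforall
      have := hforall j hj
      rw [pvGood_pos nums _ j (by omega)] at this
      rw [hpb] at this
      exact Bool.false_ne_true this.2

theorem pvB_false (nums : List Int) (sequences : List (List Int))
    (hperm : ¬ nums.Perm (pvNodes nums.length)) :
    solution_function_name_alt nums sequences = false := by
  simp only [solution_function_name_alt]
  have hne : PySem.List.sorted nums (fun x => x) false ≠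
      PySem.List.pyRange 1 ((nums.length : Int) + 1) 1 := by
    intro h
    apply hperm
    have hp := PySem.List.sorted_perm nums (fun x => x) false
    rw [h] at hp
    exact hp.symm
  rw [if_pos hne]

-- ===== VERDICT (by name: the statement is the Claim_ definition above) =====
theorem solution_function_name_spec : Claim_equal_solution_function_name := by
  intro nums sequences _ hpre
  unfold Spec_solution_function_name
  by_cases hperm : nums.Perm (pvNodes nums.length)
  · rw [pvA_eq nums sequences hpre hperm, pvB_eq nums sequences hpre hperm]
  · rw [pvA_false nums sequences hpre hperm, pvB_false nums sequences hperm]
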